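-- pv_equiv track=rewrite | github.com/Dcbaas/MTH325Prj | Relations&Digraphs.py | is_sym
-- ===== SOURCE A (Python) =====
-- def is_sym(ground, relation):  # Takes digraph as input
--     for A in ground:  # For each element in digraph
--         for B in ground:  # For each set of elements in digraph
--             value1 = False  # Assume no relation between these elements
--             value2 = False  # Assume no reverse relation between these elements
--             for rel in relation:  # Check each relation against these two elements
--                 if rel[0] == A and rel[1] == B:  # If A relates to B
--                     value1 = True  # Relation 1 is true
--                 if rel[1] == A and rel[0] == B:  # If B relates to A
--                     value2 = True  # Relation 2 is true
--             if value1 and not value2:  # If only one value relates to the other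
--                 return False  # The digraph is not symmetric
--             if value2 and not value1:  # See above
--                 return False  # See above
--     return True  # If we have not disproven it after checking each set of elements, the digraph must be symmetric
-- ===== SOURCE B (Python) =====
-- def is_sym(ground, relation):
--     g = set(ground)
--     pairs = {(a, b) for (a, b) in relation if a in g and b in g}
--     return all((b, a) in pairs for (a, b) in pairs)
-- ===== Notes on version B (the rewrite author's own statement) =====
-- stated objective: faster
-- what changed: Replaces the ground x ground double loop with an inner rescan of the relation by one pass over the relation building a set of in-ground pairs, then a single membership check of each reversed pair against that set.
import Mathlib
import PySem

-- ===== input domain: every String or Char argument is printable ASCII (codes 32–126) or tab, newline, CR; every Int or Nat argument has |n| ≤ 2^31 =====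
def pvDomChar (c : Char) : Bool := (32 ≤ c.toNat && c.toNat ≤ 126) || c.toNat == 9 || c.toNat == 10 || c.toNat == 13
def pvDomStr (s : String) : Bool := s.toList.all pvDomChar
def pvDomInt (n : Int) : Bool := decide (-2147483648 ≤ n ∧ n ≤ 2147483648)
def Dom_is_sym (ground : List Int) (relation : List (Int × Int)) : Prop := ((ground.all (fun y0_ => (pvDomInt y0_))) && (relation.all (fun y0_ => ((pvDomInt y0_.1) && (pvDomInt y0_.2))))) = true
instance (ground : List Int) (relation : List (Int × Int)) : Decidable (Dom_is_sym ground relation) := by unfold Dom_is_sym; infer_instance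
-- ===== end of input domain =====

-- B replaces A's ground×ground double loop (with an inner rescan of the relation)
-- by one pass building the set of in-ground pairs and checking each reversed pair
-- against it (objective: faster).

-- ===== PORT A =====
-- inner 'for rel in relation' loop of A: accumulates (value1, value2)
def symInner (a b : Int) (relation : List (Int × Int)) : Bool × Bool :=
  relation.foldl (fun v rel =>
    (if rel.1 == a && rel.2 == b then true else v.1,
     if rel.2 == a && rel.1 == b then true else v.2)) (false, false)

-- 'for B in ground' loop (early return False propagates as result false)
def symLoopB (a : Int) (bs : List Int) (relation : List (Int × Int)) : Bool :=
  match bs with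
  | [] => true
  | b :: rest =>
    let v := symInner a b relation
    if v.1 && !v.2 then false
    else if v.2 && !v.1 then false
    else symLoopB a rest relation

-- 'for A in ground' loop
def symLoopA (as_ : List Int) (ground : List Int) (relation : List (Int × Int)) : Bool :=
  match as_ with
  | [] => true
  | a :: rest =>
    if symLoopB a ground relation then symLoopA rest ground relation else false

def is_sym (ground : List Int) (relation : List (Int × Int)) : Bool :=
  symLoopA ground ground relation

-- ===== PORT B =====
def is_sym_alt (ground : List Int) (relation : List (Int × Int)) : Bool :=
  let g : PySem.Set Int := PySem.Set.ofList ground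
  let pairs : PySem.Set (Int × Int) :=
    PySem.Set.ofList (relation.filter (fun p => PySem.Set.contains g p.1 && PySem.Set.contains g p.2))
  pairs.all (fun p => PySem.Set.contains pairs (p.2, p.1))

-- ===== PRECONDITION & SPEC =====
def Spec_is_sym (ground : List Int) (relation : List (Int × Int)) (out : Bool) : Prop := out = is_sym_alt ground relation
instance (ground : List Int) (relation : List (Int × Int)) (out : Bool) : Decidable (Spec_is_sym ground relation out) := by unfold Spec_is_sym; infer_instance

-- ===== CLAIM (what is proved, stated in full; the proofs are below) =====
def Claim_equal_is_sym : Prop := ∀ (ground : List Int) (relation : List (Int × Int)), Dom_is_sym ground relation → Spec_is_sym ground relation (is_sym ground relation)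

-- ===== LEMMAS AND PROOFS =====

-- the inner loop computes the two 'any' predicates
lemma symInner_eq (a b : Int) (relation : List (Int × Int)) :
    symInner a b relation =
      (relation.any (fun r => r.1 == a && r.2 == b),
       relation.any (fun r => r.1 == b && r.2 == a)) := by
  have if_true_or : ∀ (c x : Bool), (if c = true then true else x) = (x || c) := by
    intro c x; cases c <;> cases x <;> simp
  have gen : ∀ (rs : List (Int × Int)) (v : Bool × Bool),
      rs.foldl (fun v rel =>
        (if rel.1 == a && rel.2 == b then true else v.1,
         if rel.2 == a && rel.1 == b then true else v.2)) v =
      (v.1 || rs.any (fun r => r.1 == a && r.2 == b),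
       v.2 || rs.any (fun r => r.1 == b && r.2 == a)) := by
    intro rs
    induction rs with
    | nil => intro v; simp
    | cons r rest ih =>
      intro v
      rw [List.foldl_cons, ih]
      simp only [List.any_cons, if_true_or, Bool.or_assoc, Bool.and_comm]
  rw [symInner, gen relation (false, false)]
  simp

lemma any_pair (a b : Int) (relation : List (Int × Int)) :
    relation.any (fun r => r.1 == a && r.2 == b) = decide ((a, b) ∈ relation) := by
  rw [Bool.eq_iff_iff, List.any_eq_true, decide_eq_true_iff]
  constructor
  · rintro ⟨r, hr, h⟩
    simp only [Bool.and_eq_true, beq_iff_eq] at h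
    obtain ⟨h1, h2⟩ := h
    have : r = (a, b) := Prod.ext h1 h2
    rwa [this] at hr
  · intro h; exact ⟨(a, b), h, by simp⟩

lemma symLoopB_eq_true (a : Int) (bs : List Int) (relation : List (Int × Int)) :
    symLoopB a bs relation = true ↔
      ∀ b ∈ bs, ((a, b) ∈ relation ↔ (b, a) ∈ relation) := by
  induction bs with
  | nil => simp [symLoopB]
  | cons b rest ih =>
    simp only [symLoopB, symInner_eq, List.mem_cons]
    rw [any_pair a b relation, any_pair b a relation]
    by_cases h1 : (a, b) ∈ relation <;> by_cases h2 : (b, a) ∈ relation <;>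
      simp [h1, h2, ih]

lemma is_sym_eq_true (ground : List Int) (relation : List (Int × Int)) :
    is_sym ground relation = true ↔
      ∀ a ∈ ground, ∀ b ∈ ground, ((a, b) ∈ relation ↔ (b, a) ∈ relation) := by
  unfold is_sym
  have gen : ∀ (as_ : List Int),
      symLoopA as_ ground relation = true ↔
        ∀ a ∈ as_, ∀ b ∈ ground, ((a, b) ∈ relation ↔ (b, a) ∈ relation) := by
    intro as_
    induction as_ with
    | nil => simp [symLoopA]
    | cons a rest ih =>
      simp only [symLoopA, List.mem_cons]
      by_cases h : symLoopB a ground relation = true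
      · rw [if_pos h, ih]
        rw [symLoopB_eq_true] at h
        constructor
        · rintro hrest a' (rfl | ha') b hb
          · exact h b hb
          · exact hrest a' ha' b hb
        · intro hall a' ha' b hb
          exact hall a' (Or.inr ha') b hb
      · rw [if_neg h]
        rw [symLoopB_eq_true] at h
        push Not at h
        obtain ⟨b, hb, hne⟩ := h
        simp only [Bool.false_eq_true, false_iff]
        intro hall
        have h' := hall a (Or.inl rfl) b hb
        tauto
  exact gen ground

lemma is_sym_alt_eq_true (ground : List Int) (relation : List (Int × Int)) :
    is_sym_alt ground relation = true ↔
      ∀ p ∈ relation, p.1 ∈ ground → p.2 ∈ ground → (p.2, p.1) ∈ relation := by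
  unfold is_sym_alt
  simp only [List.all_eq_true, PySem.Set.mem_ofList, List.mem_filter,
    Bool.and_eq_true, PySem.Set.contains_iff]
  constructor
  · intro h p hp h1 h2
    exact ((h p ⟨hp, h1, h2⟩).1)
  · intro h p hp
    exact ⟨h p hp.1 hp.2.1 hp.2.2, hp.2.2, hp.2.1⟩

-- ===== VERDICT (by name: the statement is the Claim_ definition above) =====
theorem is_sym_spec : Claim_equal_is_sym := by
  intro ground relation _
  unfold Spec_is_sym
  rw [Bool.eq_iff_iff, is_sym_eq_true, is_sym_alt_eq_true]
  constructor
  · rintro h ⟨a, b⟩ hp ha hb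
    exact ((h a ha b hb).mp hp)
  · intro h a ha b hb
    constructor
    · intro hab; exact h (a, b) hab ha hb
    · intro hba; exact h (b, a) hba hb ha
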